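-- pv_equiv track=rewrite | github.com/fenomelini/balatro-odyssey-wiki | scripts/extract_data.py | joker_key_to_group_name
-- ===== SOURCE A (Python) =====
-- def joker_key_to_group_name(key: str):
--     """
--     key like "j_singularity_solitary" → group="singularity", name="solitary"
--     key like "j_hand_and_discard_foo" → group="hand_and_discard", name="foo"
--     """
--     known_groups = [
--         "singularity", "quantum", "temporal", "dimensions", "corruption",
--         "chaos", "economy", "transformations", "luck_and_probability", "pos",
--         "hand_and_discard", "elemental", "tribal", "social", "cond", "time",
--         "paradox", "celestial", "anomaly", "glitch", "professions", "final",
--         "probability",  # some files use probability instead of luck_and_probability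
--     ]
--     # Strip "j_" prefix
--     rest = key[2:] if key.startswith("j_") else key
--     for g in sorted(known_groups, key=len, reverse=True):
--         if rest.startswith(g + "_"):
--             item_name = rest[len(g) + 1:]
--             return g, item_name
--     # Fallback: split on first underscore after j_
--     parts = rest.split("_", 1)
--     return parts[0], parts[1] if len(parts) > 1 else rest
-- ===== SOURCE B (Python) =====
-- _GROUPS = frozenset(
--     "singularity quantum temporal dimensions corruption chaos economy "
--     "transformations luck_and_probability pos hand_and_discard elemental "
--     "tribal social cond time paradox celestial anomaly glitch professions "
--     "final probability".split()
-- )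
--
--
-- def joker_key_to_group_name(key: str):
--     rest = key[2:] if key.startswith("j_") else key
--     parts = rest.split("_")
--     # try the longest token-prefix first: joining k leading tokens restores
--     # the prefix of rest up to its k-th underscore
--     for k in range(len(parts) - 1, 0, -1):
--         cand = "_".join(parts[:k])
--         if cand in _GROUPS:
--             return cand, "_".join(parts[k:])
--     if len(parts) > 1:
--         return parts[0], "_".join(parts[1:])
--     return rest, rest
-- ===== Notes on version B (the rewrite author's own statement) =====
-- stated objective: alternative
-- what changed: Instead of testing each known group (length-sorted) against the key with startswith, B tokenizes the key on underscores once and probes the joined token-prefixes from longest to shortest against a frozenset of group names; the fallback is expressed over the same token list instead of a second split.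
import Mathlib
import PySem

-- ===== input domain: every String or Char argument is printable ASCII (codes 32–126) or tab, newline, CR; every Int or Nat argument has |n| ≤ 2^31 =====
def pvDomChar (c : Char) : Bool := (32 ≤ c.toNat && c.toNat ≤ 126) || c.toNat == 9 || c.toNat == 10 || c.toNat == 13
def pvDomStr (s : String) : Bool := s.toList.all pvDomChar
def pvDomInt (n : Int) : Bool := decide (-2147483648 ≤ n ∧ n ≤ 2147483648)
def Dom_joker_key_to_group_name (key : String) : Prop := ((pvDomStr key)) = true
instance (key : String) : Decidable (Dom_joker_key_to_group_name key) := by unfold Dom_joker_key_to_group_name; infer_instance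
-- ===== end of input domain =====

-- B replaces A's startswith loop over the length-sorted group list by tokenizing the key on
-- underscores once and probing joined token-prefixes, longest first, against a set of group names.

-- ===== PORT A =====
def pvKnownGroups : List (List Char) :=
  ["singularity".toList, "quantum".toList, "temporal".toList, "dimensions".toList, "corruption".toList,
   "chaos".toList, "economy".toList, "transformations".toList, "luck_and_probability".toList, "pos".toList,
   "hand_and_discard".toList, "elemental".toList, "tribal".toList, "social".toList, "cond".toList, "time".toList,
   "paradox".toList, "celestial".toList, "anomaly".toList, "glitch".toList, "professions".toList, "final".toList,
   "probability".toList]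

def pvGroupLoop (rest : List Char) : List (List Char) → Option (List Char × List Char)
  | [] => none
  | g :: gs =>
      if PySem.Chars.startswith rest (g ++ ['_']) then
        some (g, PySem.List.slice rest (some (PySem.Chars.len g + 1)) none)
      else pvGroupLoop rest gs

def joker_key_to_group_name (key : String) : String × String :=
  let rest : List Char :=
    if PySem.Chars.startswith key.toList ['j', '_'] then PySem.List.slice key.toList (some 2) none
    else key.toList
  match pvGroupLoop rest (PySem.List.sorted pvKnownGroups (fun g => PySem.Chars.len g) true) with
  | some (g, item) => (String.ofList g, String.ofList item)
  | none =>
      -- Fallback: rest.split("_", 1); parts[0] of the never-empty split result is its head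
      let parts := PySem.Chars.splitOnMax rest ['_'] 1
      (String.ofList (parts.headD []),
       String.ofList (if parts.length > 1 then parts.getD 1 [] else rest))

-- ===== PORT B =====
def pvGroupWords : PySem.Set (List Char) :=
  PySem.Set.ofList (PySem.Chars.split₀
    "singularity quantum temporal dimensions corruption chaos economy transformations luck_and_probability pos hand_and_discard elemental tribal social cond time paradox celestial anomaly glitch professions final probability".toList)

-- 'for k in range(len(parts) - 1, 0, -1)' as the obvious countdown recursion on k
def pvJoinScan (parts : List (List Char)) : Nat → Option (List Char × List Char)
  | 0 => none
  | k + 1 =>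
      let cand := PySem.Chars.join ['_'] (PySem.List.slice parts none (some ((k + 1 : Nat) : Int)))
      if pvGroupWords.contains cand then
        some (cand, PySem.Chars.join ['_'] (PySem.List.slice parts (some ((k + 1 : Nat) : Int)) none))
      else pvJoinScan parts k

def joker_key_to_group_name_alt (key : String) : String × String :=
  let rest : List Char :=
    if PySem.Chars.startswith key.toList ['j', '_'] then PySem.List.slice key.toList (some 2) none
    else key.toList
  let parts := PySem.Chars.splitOn rest ['_']
  match pvJoinScan parts (parts.length - 1) with
  | some (g, item) => (String.ofList g, String.ofList item)
  | none =>
      if parts.length > 1 then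
        -- parts[0] of the never-empty split result is its head
        (String.ofList (parts.headD []),
         String.ofList (PySem.Chars.join ['_'] (PySem.List.slice parts (some (1 : Int)) none)))
      else (String.ofList rest, String.ofList rest)

-- ===== PRECONDITION & SPEC =====
def Spec_joker_key_to_group_name (key : String) (out : String × String) : Prop := out = joker_key_to_group_name_alt key
instance (key : String) (out : String × String) : Decidable (Spec_joker_key_to_group_name key out) := by unfold Spec_joker_key_to_group_name; infer_instance

-- ===== CLAIM (what is proved, stated in full; the proofs are below) =====
def Claim_equal_joker_key_to_group_name : Prop := ∀ (key : String), Dom_joker_key_to_group_name key → Spec_joker_key_to_group_name key (joker_key_to_group_name key)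

-- ===== LEMMAS AND PROOFS =====

-- functional model of rest.split("_") (single-char sep): pvF pre l prepends pre to the first piece
def pvF : List Char → List Char → List (List Char)
  | pre, [] => [pre]
  | pre, c :: r => if c = '_' then pre :: pvF [] r else pvF (pre ++ [c]) r

-- functional model of rest.split("_", 1)
def pvG : List Char → List Char → List (List Char)
  | pre, [] => [pre]
  | pre, c :: r => if c = '_' then [pre, r] else pvG (pre ++ [c]) r

theorem pv_go_eq : ∀ (fuel : Nat) (l cur : List Char) (acc : List (List Char)), l.length ≤ fuel →
    PySem.Chars.splitOn.go ['_'] fuel l cur acc = acc.reverse ++ pvF cur.reverse l := by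
  intro fuel
  induction fuel with
  | zero =>
    intro l cur acc h
    have : l = [] := List.eq_nil_of_length_eq_zero (Nat.le_zero.mp h)
    subst this
    simp [PySem.Chars.splitOn.go, pvF]
  | succ f ih =>
    intro l cur acc h
    cases l with
    | nil => simp [PySem.Chars.splitOn.go, pvF]
    | cons c r =>
      by_cases hc : c = '_'
      · subst hc
        rw [show PySem.Chars.splitOn.go ['_'] (f+1) ('_' :: r) cur acc
            = PySem.Chars.splitOn.go ['_'] f r [] (cur.reverse :: acc) from by
          simp [PySem.Chars.splitOn.go, List.isPrefixOf]]
        rw [ih r [] (cur.reverse :: acc) (by simp at h ⊢; omega)]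
        simp [pvF]
      · rw [show PySem.Chars.splitOn.go ['_'] (f+1) (c :: r) cur acc
            = PySem.Chars.splitOn.go ['_'] f r (c :: cur) acc from by
          rw [PySem.Chars.splitOn.go]; simp [List.isPrefixOf, Ne.symm hc]]
        rw [ih r (c :: cur) acc (by simp at h ⊢; omega)]
        simp [pvF, hc]

theorem pv_splitOn_eq (rest : List Char) : PySem.Chars.splitOn rest ['_'] = pvF [] rest := by
  rw [PySem.Chars.splitOn, pv_go_eq (rest.length + 1) rest [] [] (by omega)]
  simp

theorem pv_goMax_zero : ∀ (fuel : Nat) (l cur : List Char) (acc : List (List Char)),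
    PySem.Chars.splitOnMax.go ['_'] fuel 0 l cur acc = acc.reverse ++ [cur.reverse ++ l] := by
  intro fuel l cur acc
  cases fuel with
  | zero => rw [PySem.Chars.splitOnMax.go]; simp
  | succ f => cases l with
    | nil => rw [PySem.Chars.splitOnMax.go]; simp; omega
    | cons c r => rw [PySem.Chars.splitOnMax.go]; simp

theorem pv_goMax_one : ∀ (fuel : Nat) (l cur : List Char) (acc : List (List Char)), l.length ≤ fuel →
    PySem.Chars.splitOnMax.go ['_'] fuel 1 l cur acc = acc.reverse ++ pvG cur.reverse l := by
  intro fuel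
  induction fuel with
  | zero =>
    intro l cur acc h
    have : l = [] := List.eq_nil_of_length_eq_zero (Nat.le_zero.mp h)
    subst this
    rw [PySem.Chars.splitOnMax.go]; simp [pvG]
  | succ f ih =>
    intro l cur acc h
    cases l with
    | nil => rw [PySem.Chars.splitOnMax.go]; simp [pvG]; omega
    | cons c r =>
      by_cases hc : c = '_'
      · subst hc
        rw [show PySem.Chars.splitOnMax.go ['_'] (f+1) 1 ('_' :: r) cur acc
            = PySem.Chars.splitOnMax.go ['_'] f 0 r [] (cur.reverse :: acc) from by
          rw [PySem.Chars.splitOnMax.go]; simp [List.isPrefixOf]]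
        rw [pv_goMax_zero]
        simp [pvG]
      · rw [show PySem.Chars.splitOnMax.go ['_'] (f+1) 1 (c :: r) cur acc
            = PySem.Chars.splitOnMax.go ['_'] f 1 r (c :: cur) acc from by
          rw [PySem.Chars.splitOnMax.go]; simp [List.isPrefixOf, Ne.symm hc]]
        rw [ih r (c :: cur) acc (by simp at h ⊢; omega)]
        simp [pvG, hc]

theorem pv_splitOnMax_eq (rest : List Char) : PySem.Chars.splitOnMax rest ['_'] 1 = pvG [] rest := by
  rw [PySem.Chars.splitOnMax]
  rw [if_neg (by norm_num)]
  rw [show ((1:Int).toNat) = 1 from rfl, pv_goMax_one (rest.length + 1) rest [] [] (by omega)]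
  simp

theorem pvF_ne_nil (l pre : List Char) : pvF pre l ≠ [] := by
  induction l generalizing pre with
  | nil => simp [pvF]
  | cons c r ih => by_cases hc : c = '_' <;> simp [pvF, hc, ih]

-- join restores the input
theorem pvF_join : ∀ (l pre : List Char), PySem.Chars.join ['_'] (pvF pre l) = pre ++ l := by
  intro l
  induction l with
  | nil => intro pre; simp [pvF, PySem.Chars.join_singleton]
  | cons c r ih =>
    intro pre
    by_cases hc : c = '_'
    · subst hc
      rw [pvF, if_pos rfl]
      cases hF : pvF [] r with
      | nil => exact absurd hF (pvF_ne_nil r [])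
      | cons x xs =>
        rw [PySem.Chars.join_cons_cons, ← hF, ih]
        simp
    · rw [pvF, if_neg hc, ih]
      simp

-- split("_",1) in terms of split("_")
theorem pvG_eq : ∀ (l pre : List Char), pvG pre l =
    match pvF pre l with
    | [] => []
    | [x] => [x]
    | x :: xs => [x, PySem.Chars.join ['_'] xs] := by
  intro l
  induction l with
  | nil => intro pre; simp [pvF, pvG]
  | cons c r ih =>
    intro pre
    by_cases hc : c = '_'
    · subst hc
      rw [pvG, if_pos rfl, pvF, if_pos rfl]
      cases hF : pvF [] r with
      | nil => exact absurd hF (pvF_ne_nil r [])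
      | cons x xs =>
        have : PySem.Chars.join ['_'] (x :: xs) = r := by rw [← hF, pvF_join]; simp
        simp [this]
    · rw [pvG, if_neg hc, pvF, if_neg hc, ih]

-- no piece of the split contains the separator
theorem pvF_no_sep : ∀ (l pre : List Char), '_' ∉ pre → ∀ p ∈ pvF pre l, '_' ∉ p := by
  intro l
  induction l with
  | nil => intro pre h p hp; simp [pvF] at hp; subst hp; exact h
  | cons c r ih =>
    intro pre h p hp
    by_cases hc : c = '_'
    · subst hc
      rw [pvF, if_pos rfl] at hp
      rcases List.mem_cons.mp hp with rfl | hp'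
      · exact h
      · exact ih [] (by simp) p hp'
    · rw [pvF, if_neg hc] at hp
      exact ih (pre ++ [c]) (by simp [h, Ne.symm hc]) p hp

-- splitting join at an interior token boundary
theorem pvV : ∀ (P : List (List Char)) (k : Nat), 0 < k → k < P.length →
    PySem.Chars.join ['_'] P
      = PySem.Chars.join ['_'] (P.take k) ++ '_' :: PySem.Chars.join ['_'] (P.drop k) := by
  intro P
  induction P with
  | nil => intro k h0 hk; simp at hk
  | cons p P' ih =>
    intro k h0 hk
    match k, h0 with
    | 1, _ =>
      match P', hk with
      | q :: R, _ =>
        rw [PySem.Chars.join_cons_cons]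
        simp [PySem.Chars.join_singleton]
    | (k' + 2), _ =>
      have hk' : k' + 1 < P'.length := by simpa using hk
      match P', hk with
      | q :: R, _ =>
        rw [PySem.Chars.join_cons_cons, ih (k' + 1) (by omega) hk']
        rw [show (p :: q :: R).take (k' + 2) = p :: q :: R.take k' from by simp,
            PySem.Chars.join_cons_cons,
            show PySem.Chars.join ['_'] (q :: List.take k' R)
              = PySem.Chars.join ['_'] ((q :: R).take (k' + 1)) from by simp]
        simp

-- longer token-prefixes give strictly longer joins
theorem pvMono (P : List (List Char)) (k k' : Nat) (h0 : 0 < k) (hkk : k < k') (hk' : k' ≤ P.length) :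
    (PySem.Chars.join ['_'] (P.take k)).length < (PySem.Chars.join ['_'] (P.take k')).length := by
  have h := pvV (P.take k') k h0 (by simp; omega)
  rw [List.take_take, min_eq_left (by omega)] at h
  rw [h]
  simp

-- every group match 'g ++ "_" <+: join P' is a token-prefix join (pieces have no '_')
theorem pvComplete : ∀ (P : List (List Char)), (∀ p ∈ P, '_' ∉ p) → ∀ (g : List Char),
    (g ++ ['_']) <+: PySem.Chars.join ['_'] P →
    ∃ k, 0 < k ∧ k < P.length ∧ PySem.Chars.join ['_'] (P.take k) = g := by
  intro P
  induction P with
  | nil =>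
    intro _ g h
    rw [PySem.Chars.join_nil] at h
    simp at h
  | cons p P' ih =>
    intro hnu g h
    cases P' with
    | nil =>
      rw [PySem.Chars.join_singleton] at h
      exact absurd (h.subset (by simp)) (hnu p (by simp))
    | cons q R =>
      rw [PySem.Chars.join_cons_cons] at h
      rw [show p ++ ['_'] ++ PySem.Chars.join ['_'] (q :: R)
            = p ++ ('_' :: PySem.Chars.join ['_'] (q :: R)) from by simp] at h
      have hpJ : p <+: p ++ ('_' :: PySem.Chars.join ['_'] (q :: R)) := List.prefix_append _ _
      have hgJ : g <+: p ++ ('_' :: PySem.Chars.join ['_'] (q :: R)) :=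
        ((List.prefix_append g ['_']).trans h)
      rcases lt_trichotomy g.length p.length with hlt | heq | hgt
      · exfalso
        have hpre : (g ++ ['_']) <+: p :=
          List.prefix_of_prefix_length_le h hpJ (by simp; omega)
        exact absurd (hpre.subset (by simp)) (hnu p (by simp))
      · have : g = p :=
          List.IsPrefix.eq_of_length (List.prefix_of_prefix_length_le hgJ hpJ (by omega)) heq
        subst this
        exact ⟨1, by omega, by simp, by simp [PySem.Chars.join_singleton]⟩
      · obtain ⟨r, rfl⟩ := List.prefix_of_prefix_length_le hpJ hgJ (by omega)
        have hr : r ++ ['_'] <+: '_' :: PySem.Chars.join ['_'] (q :: R) := by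
          rw [List.append_assoc] at h
          exact (List.prefix_append_right_inj p).mp h
        cases r with
        | nil => simp at hgt
        | cons c r' =>
          have hc : c = '_' ∧ (r' ++ ['_']) <+: PySem.Chars.join ['_'] (q :: R) := by
            rw [List.cons_append, List.cons_prefix_cons] at hr
            exact ⟨hr.1, hr.2⟩
          obtain ⟨k', hk0, hkl, hkj⟩ := ih (fun x hx => hnu x (List.mem_cons_of_mem _ hx)) r' hc.2
          refine ⟨k' + 1, by omega, by simpa using Nat.succ_lt_succ hkl, ?_⟩
          rw [List.take_succ_cons]
          cases htk : (q :: R).take k' with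
          | nil => exact absurd htk (by simp; omega)
          | cons y ys =>
            rw [htk] at hkj
            rw [PySem.Chars.join_cons_cons, hkj, hc.1]
            simp

-- B's word set holds exactly A's known groups
set_option maxRecDepth 8192 in
theorem pvWords_iff (x : List Char) :
    pvGroupWords.contains x = true ↔ x ∈ pvKnownGroups := by
  have hsp : PySem.Chars.split₀
      "singularity quantum temporal dimensions corruption chaos economy transformations luck_and_probability pos hand_and_discard elemental tribal social cond time paradox celestial anomaly glitch professions final probability".toList
      = pvKnownGroups := by decide
  unfold pvGroupWords
  rw [hsp]
  exact List.contains_iff_mem.trans (PySem.Set.mem_ofList _ _)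

-- "rest starts with g followed by '_'" characterised by position g.length (A's startswith test)
theorem pv_match_iff (rest g : List Char) :
    PySem.Chars.startswith rest (g ++ ['_']) = true ↔ (g ++ ['_']) <+: rest :=
  PySem.Chars.startswith_iff rest _

-- A-side loop: none ↔ no group matches
theorem pv_groupLoop_none (rest : List Char) (L : List (List Char)) :
    pvGroupLoop rest L = none ↔ ∀ g ∈ L, ¬ (g ++ ['_']) <+: rest := by
  induction L with
  | nil => simp [pvGroupLoop]
  | cons g gs ih =>
    by_cases h : PySem.Chars.startswith rest (g ++ ['_']) = true
    · constructor
      · intro hc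
        simp [pvGroupLoop, h] at hc
      · intro hall
        exact absurd ((pv_match_iff rest g).mp h) (hall g (by simp))
    · simp only [Bool.not_eq_true] at h
      rw [show pvGroupLoop rest (g :: gs) = pvGroupLoop rest gs from by
        simp [pvGroupLoop, h], ih]
      constructor
      · intro hall g' hg'
        rw [List.mem_cons] at hg'
        rcases hg' with rfl | hmem
        · intro hm
          rw [← pv_match_iff] at hm
          simp [h] at hm
        · exact hall _ hmem
      · exact fun hall g' hg' => hall g' (List.mem_cons_of_mem _ hg')

-- A-side loop: the returned group matches and is longest among matches (list sorted by length desc.)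
theorem pv_groupLoop_some (rest : List Char) (L : List (List Char)) (out : List Char × List Char)
    (hp : L.Pairwise (fun a b => b.length ≤ a.length))
    (h : pvGroupLoop rest L = some out) :
    ∃ g, g ∈ L ∧ (g ++ ['_']) <+: rest ∧
      out = (g, PySem.List.slice rest (some (PySem.Chars.len g + 1)) none) ∧
      ∀ h' ∈ L, (h' ++ ['_']) <+: rest → h'.length ≤ g.length := by
  induction L with
  | nil => simp [pvGroupLoop] at h
  | cons g gs ih =>
    rw [List.pairwise_cons] at hp
    by_cases hg : PySem.Chars.startswith rest (g ++ ['_']) = true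
    · refine ⟨g, by simp, (pv_match_iff rest g).mp hg, ?_, ?_⟩
      · simp [pvGroupLoop, hg] at h
        exact h.symm
      · intro h' hh' _
        rw [List.mem_cons] at hh'
        rcases hh' with rfl | hmem
        · exact le_rfl
        · exact hp.1 _ hmem
    · simp only [Bool.not_eq_true] at hg
      rw [show pvGroupLoop rest (g :: gs) = pvGroupLoop rest gs from by
        simp [pvGroupLoop, hg]] at h
      obtain ⟨g', hg'mem, hg'match, hout, hmax⟩ := ih hp.2 h
      refine ⟨g', List.mem_cons_of_mem _ hg'mem, hg'match, hout, ?_⟩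
      intro h' hh' hm
      rw [List.mem_cons] at hh'
      rcases hh' with rfl | hmem
      · rw [← pv_match_iff] at hm
        simp [hg] at hm
      · exact hmax _ hmem hm

-- B-side scan: none when no tried token-prefix is a known group
theorem pv_scan_none (P : List (List Char)) (n : Nat)
    (h : ∀ j, 0 < j → j ≤ n → pvGroupWords.contains (PySem.Chars.join ['_'] (P.take j)) = false) :
    pvJoinScan P n = none := by
  induction n with
  | zero => rfl
  | succ k ih =>
    rw [pvJoinScan]
    simp only [PySem.List.slice_to_natCast]
    rw [h (k + 1) (by omega) (by omega)]
    simp only [Bool.false_eq_true, if_false]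
    exact ih (fun j hj1 hj2 => h j hj1 (by omega))

-- B-side scan: returns the highest k whose token-prefix is a known group
theorem pv_scan_some (P : List (List Char)) (n i : Nat)
    (h0 : 0 < i) (hin : i ≤ n)
    (hi : pvGroupWords.contains (PySem.Chars.join ['_'] (P.take i)) = true)
    (hmax : ∀ j, i < j → j ≤ n → pvGroupWords.contains (PySem.Chars.join ['_'] (P.take j)) = false) :
    pvJoinScan P n = some (PySem.Chars.join ['_'] (P.take i), PySem.Chars.join ['_'] (P.drop i)) := by
  induction n with
  | zero => omega
  | succ k ih =>
    rw [pvJoinScan]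
    simp only [PySem.List.slice_to_natCast, PySem.List.slice_from_natCast]
    by_cases hik : i = k + 1
    · subst hik
      rw [hi]
      simp
    · rw [hmax (k + 1) (by omega) (by omega)]
      simp only [Bool.false_eq_true, if_false]
      exact ih (by omega) (fun j hj1 hj2 => hmax j hj1 (by omega))

-- the two programs agree on every rest
theorem pv_core (rest : List Char) :
    (match pvGroupLoop rest (PySem.List.sorted pvKnownGroups (fun g => PySem.Chars.len g) true) with
      | some (g, item) => (String.ofList g, String.ofList item)
      | none =>
          let parts := PySem.Chars.splitOnMax rest ['_'] 1
          (String.ofList (parts.headD []),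
           String.ofList (if parts.length > 1 then parts.getD 1 [] else rest)))
    = (let parts := PySem.Chars.splitOn rest ['_']
       match pvJoinScan parts (parts.length - 1) with
      | some (g, item) => (String.ofList g, String.ofList item)
      | none =>
          if parts.length > 1 then
            (String.ofList (parts.headD []),
             String.ofList (PySem.Chars.join ['_'] (PySem.List.slice parts (some (1 : Int)) none)))
          else (String.ofList rest, String.ofList rest)) := by
  have hP : PySem.Chars.splitOn rest ['_'] = pvF [] rest := pv_splitOn_eq rest
  have hrest : PySem.Chars.join ['_'] (pvF [] rest) = rest := by
    rw [pvF_join]; rfl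
  have hne : pvF [] rest ≠ [] := pvF_ne_nil rest []
  have hnu : ∀ p ∈ pvF [] rest, '_' ∉ p := pvF_no_sep rest [] (by simp)
  have hpair : (PySem.List.sorted pvKnownGroups (fun g => PySem.Chars.len g) true).Pairwise
      (fun a b => b.length ≤ a.length) := by
    have := PySem.List.sorted_pairwise_rev pvKnownGroups (fun g => PySem.Chars.len g)
    refine this.imp ?_
    intro a b h
    simpa [PySem.Chars.len_eq] using h
  simp only [hP]
  cases hA : pvGroupLoop rest (PySem.List.sorted pvKnownGroups (fun g => PySem.Chars.len g) true) with
  | none =>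
    have hnone := (pv_groupLoop_none rest _).mp hA
    have hscan : pvJoinScan (pvF [] rest) ((pvF [] rest).length - 1) = none := by
      apply pv_scan_none
      intro j hj1 hj2
      by_contra hc
      simp only [Bool.not_eq_false] at hc
      have hjlen : j < (pvF [] rest).length := by omega
      have hm0 : (PySem.Chars.join ['_'] ((pvF [] rest).take j) ++ ['_'])
          <+: PySem.Chars.join ['_'] (pvF [] rest) := by
        rw [pvV (pvF [] rest) j hj1 hjlen]
        exact ⟨PySem.Chars.join ['_'] ((pvF [] rest).drop j), by simp⟩
      have hm := hrest ▸ hm0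
      exact hnone _ (by rw [PySem.List.mem_sorted]; exact (pvWords_iff _).mp hc) hm
    rw [hscan]
    rw [pv_splitOnMax_eq, pvG_eq]
    cases hF : pvF [] rest with
    | nil => exact absurd hF hne
    | cons x xs =>
      cases xs with
      | nil =>
        have hx : x = rest := by rw [← hrest, hF, PySem.Chars.join_singleton]
        subst hx
        simp
      | cons y ys =>
        rw [show (some (1 : Int)) = some ((1 : Nat) : Int) from rfl,
            PySem.List.slice_from_natCast]
        simp
  | some out =>
    obtain ⟨g, hmem, hmatch, hout, hmaxA⟩ := pv_groupLoop_some rest _ out hpair hA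
    have hgrp : g ∈ pvKnownGroups := (PySem.List.mem_sorted _ _ _ _).mp hmem
    obtain ⟨k0, hk0, hklen, hkj⟩ := pvComplete (pvF [] rest) hnu g (by rwa [hrest])
    have hi : pvGroupWords.contains (PySem.Chars.join ['_'] ((pvF [] rest).take k0)) = true :=
      (pvWords_iff _).mpr (hkj ▸ hgrp)
    have hscan : pvJoinScan (pvF [] rest) ((pvF [] rest).length - 1)
        = some (PySem.Chars.join ['_'] ((pvF [] rest).take k0),
                PySem.Chars.join ['_'] ((pvF [] rest).drop k0)) := by
      apply pv_scan_some (pvF [] rest) ((pvF [] rest).length - 1) k0 hk0 (by omega) hi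
      intro j hj1 hj2
      by_contra hc
      simp only [Bool.not_eq_false] at hc
      have hjlen : j < (pvF [] rest).length := by omega
      have hm0 : (PySem.Chars.join ['_'] ((pvF [] rest).take j) ++ ['_'])
          <+: PySem.Chars.join ['_'] (pvF [] rest) := by
        rw [pvV (pvF [] rest) j (by omega) hjlen]
        exact ⟨PySem.Chars.join ['_'] ((pvF [] rest).drop j), by simp⟩
      have hm := hrest ▸ hm0
      have hle : (PySem.Chars.join ['_'] ((pvF [] rest).take j)).length ≤ g.length :=
        hmaxA _ (by rw [PySem.List.mem_sorted]; exact (pvWords_iff _).mp hc) hm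
      have hlt := pvMono (pvF [] rest) k0 j hk0 hj1 (by omega)
      rw [hkj] at hlt
      omega
    rw [hscan, hout]
    have hitem : PySem.List.slice rest (some (PySem.Chars.len g + 1)) none
        = PySem.Chars.join ['_'] ((pvF [] rest).drop k0) := by
      have hsl : PySem.List.slice rest (some (PySem.Chars.len g + 1)) none
          = rest.drop (g.length + 1) := by
        rw [PySem.Chars.len_eq,
            show ((g.length : Int) + 1) = ((g.length + 1 : Nat) : Int) from by push_cast; ring,
            PySem.List.slice_from_natCast]
      have hrr : rest = (g ++ ['_']) ++ PySem.Chars.join ['_'] ((pvF [] rest).drop k0) := by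
        conv_lhs => rw [← hrest, pvV (pvF [] rest) k0 hk0 hklen]
        rw [hkj]
        simp
      rw [hsl]
      conv_lhs => rw [hrr]
      rw [show g.length + 1 = (g ++ ['_']).length from by simp, List.drop_left]
    rw [hkj, hitem]

-- ===== VERDICT (by name: the statement is the Claim_ definition above) =====
theorem joker_key_to_group_name_spec : Claim_equal_joker_key_to_group_name := by
  intro key _
  unfold Spec_joker_key_to_group_name joker_key_to_group_name joker_key_to_group_name_alt
  exact pv_core _
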